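-- pv_equiv track=rewrite | github.com/Ferazz/advent_of_code2022 | day5/main.py | get_crate_data
-- ===== SOURCE A (Python) =====
-- def get_crate_data(item_data):
--     crates = []
--     commands = []
--     split = False
--     for line in item_data:
--         if split:
--             commands.append(line.strip())
--             continue
--         if line.strip() == "":
--             split = True
--         crates.append(line.strip())
--     return crates, commands
-- ===== SOURCE B (Python) =====
-- def get_crate_data(item_data):
--     stripped = [line.strip() for line in item_data]
--     try:
--         idx = stripped.index("")
--     except ValueError:
--         return stripped, []
--     return stripped[:idx + 1], stripped[idx + 1:]
-- ===== Notes on version B (the rewrite author's own statement) =====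
-- stated objective: simpler
-- what changed: Replaces the stateful split-flag loop with a strip-all comprehension followed by locating the first blank line and slicing the list at that point.
import Mathlib
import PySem

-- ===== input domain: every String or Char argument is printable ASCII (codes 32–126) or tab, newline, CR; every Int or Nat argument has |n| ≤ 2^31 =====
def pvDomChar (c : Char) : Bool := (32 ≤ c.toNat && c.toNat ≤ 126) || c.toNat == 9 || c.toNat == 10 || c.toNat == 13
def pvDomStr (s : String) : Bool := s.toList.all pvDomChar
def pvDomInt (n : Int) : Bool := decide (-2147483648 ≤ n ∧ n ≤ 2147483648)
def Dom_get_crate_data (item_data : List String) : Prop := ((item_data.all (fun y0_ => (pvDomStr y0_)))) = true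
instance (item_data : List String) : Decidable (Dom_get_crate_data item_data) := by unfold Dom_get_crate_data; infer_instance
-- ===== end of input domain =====

-- B replaces A's stateful split-flag loop by strip-all, find the first blank, then slice (simpler decomposition; same cost).

-- ===== PORT A =====
-- literal port of A's loop: state (crates, commands, split), one step per line, same branch order
def get_crate_data (item_data : List String) : List String × List String :=
  let r := item_data.foldl
    (fun (st : List String × List String × Bool) line =>
      if st.2.2 then (st.1, st.2.1 ++ [PySem.Str.strip line], true)
      else if PySem.Str.strip line = "" then (st.1 ++ [PySem.Str.strip line], st.2.1, true)
      else (st.1 ++ [PySem.Str.strip line], st.2.1, false))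
    ([], [], false)
  (r.1, r.2.1)

-- ===== PORT B =====
-- literal port of Source B: strip all, index of "", slice at idx+1 (no blank → (stripped, []))
def get_crate_data_alt (item_data : List String) : List String × List String :=
  let stripped := item_data.map PySem.Str.strip
  match PySem.List.index? stripped "" with
  | none => (stripped, [])
  | some idx => (PySem.List.slice stripped none (some ((idx : Int) + 1)),
                 PySem.List.slice stripped (some ((idx : Int) + 1)) none)

-- ===== PRECONDITION & SPEC =====
def Spec_get_crate_data (item_data : List String) (out : List String × List String) : Prop := out = get_crate_data_alt item_data
instance (item_data : List String) (out : List String × List String) : Decidable (Spec_get_crate_data item_data out) := by unfold Spec_get_crate_data; infer_instance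

-- ===== CLAIM (what is proved, stated in full; the proofs are below) =====
def Claim_equal_get_crate_data : Prop := ∀ (item_data : List String), Dom_get_crate_data item_data → Spec_get_crate_data item_data (get_crate_data item_data)

-- ===== LEMMAS AND PROOFS =====

-- A's loop step, on the already-stripped line
def pvStep (st : List String × List String × Bool) (s : String) : List String × List String × Bool :=
  if st.2.2 then (st.1, st.2.1 ++ [s], true)
  else if s = "" then (st.1 ++ [s], st.2.1, true)
  else (st.1 ++ [s], st.2.1, false)

theorem pvFold_eq (item_data : List String) (st : List String × List String × Bool) :
    item_data.foldl
      (fun (st : List String × List String × Bool) line =>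
        if st.2.2 then (st.1, st.2.1 ++ [PySem.Str.strip line], true)
        else if PySem.Str.strip line = "" then (st.1 ++ [PySem.Str.strip line], st.2.1, true)
        else (st.1 ++ [PySem.Str.strip line], st.2.1, false))
      st
    = (item_data.map PySem.Str.strip).foldl pvStep st := by
  rw [List.foldl_map]; rfl

-- once split=true, everything goes to commands
theorem pvFold_true (l : List String) (c m : List String) :
    l.foldl pvStep (c, m, true) = (c, m ++ l, true) := by
  induction l generalizing m with
  | nil => simp
  | cons x xs ih => simp [pvStep, ih, List.append_assoc]

-- in split=false state, the fold splits at the first ""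
theorem pvFold_false (l : List String) (c m : List String) :
    l.foldl pvStep (c, m, false) =
      match List.idxOf? "" l with
      | none => (c ++ l, m, false)
      | some idx => (c ++ l.take (idx + 1), m ++ l.drop (idx + 1), true) := by
  induction l generalizing c with
  | nil => simp
  | cons x xs ih =>
    by_cases hx : x = ""
    · subst hx
      have hidx : List.idxOf? "" ("" :: xs) = some 0 := by simp [List.idxOf?_cons]
      rw [hidx]
      simp [pvStep, pvFold_true]
    · have hidx : List.idxOf? "" (x :: xs) = (List.idxOf? "" xs).map (· + 1) := by
        simp [List.idxOf?_cons, hx]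
      rw [hidx]
      simp only [List.foldl_cons, pvStep, hx, if_false, Bool.false_eq_true]
      rw [ih (c ++ [x])]
      cases h : List.idxOf? "" xs with
      | none => simp
      | some idx => simp

-- ===== VERDICT (by name: the statement is the Claim_ definition above) =====
theorem get_crate_data_spec : Claim_equal_get_crate_data := by
  intro item_data _
  unfold Spec_get_crate_data get_crate_data get_crate_data_alt
  rw [pvFold_eq, pvFold_false]
  simp only [PySem.List.index?_eq_idxOf?]
  cases h : List.idxOf? "" (item_data.map PySem.Str.strip) with
  | none => simp
  | some idx =>
    have h1 : ((idx : Int) + 1) = ((idx + 1 : Nat) : Int) := by push_cast; ring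
    show (([] : List String) ++ List.take (idx + 1) (item_data.map PySem.Str.strip),
          ([] : List String) ++ List.drop (idx + 1) (item_data.map PySem.Str.strip)) =
         (PySem.List.slice (item_data.map PySem.Str.strip) none (some ((idx : Int) + 1)),
          PySem.List.slice (item_data.map PySem.Str.strip) (some ((idx : Int) + 1)) none)
    rw [h1, PySem.List.slice_to_natCast, PySem.List.slice_from_natCast]
    simp
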